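-- pv_equiv track=rewrite | github.com/gkunter/coquery | coquery/options.py | encode_query_string
-- ===== SOURCE A (Python) =====
-- def encode_query_string(s):
--     """
--     Encode a query string that has can be written to a configuration file.
--
--     This method is the inverse of decode_query_string(). It takes a newline-
--     separated strinbg as read from the query string field, and transformes it
--     into a comma-separated, quoted and escaped string that can be passed on
--     to the configuration file.
--     """
--     l = s.split("\n")
--     str_list = []
--     for s in l:
--         s = s.replace("\\", "\\\\")
--         s = s.replace('"', '\\"')
--         s = s.replace("%", "%%")
--         str_list.append(s)
--     return ",".join(['"{}"'.format(x) for x in str_list])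
-- ===== SOURCE B (Python) =====
-- def encode_query_string(s):
--     """Escape the whole string at once, then turn newlines into the quoted
--     boundary '","' and wrap the result in one pair of double quotes."""
--     t = s.replace("\\", "\\\\").replace('"', '\\"').replace("%", "%%")
--     return '"' + t.replace("\n", '","') + '"'
-- ===== Notes on version B (the rewrite author's own statement) =====
-- stated objective: simpler
-- what changed: Replaces A's split-on-newline / per-line escape loop / quote-and-join pipeline with four whole-string replacements (backslash, quote, percent, then newline -> '","') and a single wrap in double quotes.
import Mathlib
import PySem

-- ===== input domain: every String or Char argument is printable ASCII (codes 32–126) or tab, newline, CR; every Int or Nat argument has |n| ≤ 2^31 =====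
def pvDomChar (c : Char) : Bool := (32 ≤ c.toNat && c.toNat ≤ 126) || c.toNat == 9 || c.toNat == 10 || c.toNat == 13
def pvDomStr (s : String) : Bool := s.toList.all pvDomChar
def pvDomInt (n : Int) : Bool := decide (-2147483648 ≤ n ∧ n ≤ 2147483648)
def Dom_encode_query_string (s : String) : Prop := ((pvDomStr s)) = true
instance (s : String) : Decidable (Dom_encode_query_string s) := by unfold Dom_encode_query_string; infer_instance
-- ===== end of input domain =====

-- B escapes the whole string at once and turns newlines into the literal '","' boundary,
-- replacing A's split/per-line-escape/quote/join loop; objective: simpler.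

-- ===== PORT A =====
def encode_query_string (s : String) : String :=
  -- l = s.split("\n")  (separator is a fixed non-empty literal, so the split never raises)
  let l := PySem.Chars.splitOn s.toList ['\n']
  -- for s in l: three replaces, then append to str_list
  let strList := l.foldl (fun acc line =>
    let e1 := PySem.Chars.replace line ['\\'] ['\\', '\\']
    let e2 := PySem.Chars.replace e1 ['"'] ['\\', '"']
    let e3 := PySem.Chars.replace e2 ['%'] ['%', '%']
    acc ++ [e3]) []
  -- ",".join(['"{}"'.format(x) for x in str_list])
  String.ofList (PySem.Chars.join [','] (strList.map (fun x => ['"'] ++ x ++ ['"'])))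

-- ===== PORT B =====
def encode_query_string_alt (s : String) : String :=
  let t := PySem.Str.replace s "\\" "\\\\"
  let t := PySem.Str.replace t "\"" "\\\""
  let t := PySem.Str.replace t "%" "%%"
  "\"" ++ PySem.Str.replace t "\n" "\",\"" ++ "\""

-- ===== PRECONDITION & SPEC =====
def Spec_encode_query_string (s : String) (out : String) : Prop := out = encode_query_string_alt s
instance (s : String) (out : String) : Decidable (Spec_encode_query_string s out) := by unfold Spec_encode_query_string; infer_instance

-- ===== CLAIM (what is proved, stated in full; the proofs are below) =====
def Claim_equal_encode_query_string : Prop := ∀ (s : String), Dom_encode_query_string s → Spec_encode_query_string s (encode_query_string s)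

-- ===== LEMMAS AND PROOFS =====

-- replace with a single-character `old` is a per-character flatMap
theorem replace_go_single (a : Char) (new : List Char) :
    ∀ (fuel : Nat) (l acc : List Char), l.length ≤ fuel →
    PySem.Chars.replace.go [a] new fuel l acc
      = acc.reverse ++ l.flatMap (fun x => if x = a then new else [x])
  | 0, [], acc, _ => by simp [PySem.Chars.replace.go]
  | 0, c :: t, acc, h => by simp at h
  | fuel+1, [], acc, _ => by simp [PySem.Chars.replace.go]
  | fuel+1, c :: t, acc, h => by
      have ih := replace_go_single a new fuel t
      simp only [PySem.Chars.replace.go]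
      by_cases hc : c = a
      · simp [hc, List.isPrefixOf, ih _ (by simpa using h)]
      · simp [List.isPrefixOf, hc, Ne.symm hc, ih _ (by simpa using h)]

theorem replace_single (a : Char) (new l : List Char) :
    PySem.Chars.replace l [a] new = l.flatMap (fun x => if x = a then new else [x]) := by
  simpa using replace_go_single a new l.length l [] le_rfl

-- split on a single character, structurally
def split1 (a : Char) : List Char → List (List Char)
  | [] => [[]]
  | c :: t => if c = a then [] :: split1 a t else (split1 a t).modifyHead (c :: ·)

theorem split1_ne_nil (a : Char) (l : List Char) : split1 a l ≠ [] := by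
  induction l with
  | nil => simp [split1]
  | cons c t ih =>
      by_cases h : c = a
      · simp [split1, h]
      · simp [split1, h]
        cases hs : split1 a t <;> simp_all

theorem splitOn_go_single (a : Char) :
    ∀ (fuel : Nat) (l cur : List Char) (acc : List (List Char)), l.length ≤ fuel →
    PySem.Chars.splitOn.go [a] fuel l cur acc
      = acc.reverse ++ (split1 a l).modifyHead (cur.reverse ++ ·)
  | 0, [], cur, acc, _ => by simp [PySem.Chars.splitOn.go, split1]
  | 0, c :: t, cur, acc, h => by simp at h
  | fuel+1, [], cur, acc, _ => by simp [PySem.Chars.splitOn.go, split1]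
  | fuel+1, c :: t, cur, acc, h => by
      have ih := splitOn_go_single a fuel t
      simp only [PySem.Chars.splitOn.go]
      by_cases hc : c = a
      · simp only [List.isPrefixOf, hc]
        simp only [split1, beq_self_eq_true, Bool.and_true, if_true, List.length_cons,
          List.length_nil, List.drop_succ_cons, List.drop_zero]
        rw [ih [] _ (by simpa using h)]
        simp
        exact congrFun List.modifyHead_id _
      · simp only [List.isPrefixOf, hc, ih _ _ (by simpa using h), split1]
        cases hs : split1 a t with
        | nil => exact absurd hs (split1_ne_nil a t)
        | cons h' t' =>
            simp
            intro h''
            exact absurd h''.symm hc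

theorem splitOn_single (a : Char) (l : List Char) :
    PySem.Chars.splitOn l [a] = split1 a l := by
  have h2 := splitOn_go_single a (l.length + 1) l [] [] (by omega)
  simp only [PySem.Chars.splitOn]
  rw [h2]
  simp
  exact congrFun List.modifyHead_id _

-- the per-character escape maps
def fbs (c : Char) : List Char := if c = '\\' then ['\\', '\\'] else [c]
def fq (c : Char) : List Char := if c = '"' then ['\\', '"'] else [c]
def fpc (c : Char) : List Char := if c = '%' then ['%', '%'] else [c]
def fnl (c : Char) : List Char := if c = '\n' then ['"', ',', '"'] else [c]

-- the full escape (three replaces in A's order) and its head decomposition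
def esc (l : List Char) : List Char := ((l.flatMap fbs).flatMap fq).flatMap fpc
def escHd (c : Char) : List Char := ((fbs c).flatMap fq).flatMap fpc

theorem esc_nil : esc [] = [] := rfl

theorem esc_cons (c : Char) (t : List Char) : esc (c :: t) = escHd c ++ esc t := by
  simp [esc, escHd, List.flatMap_cons, List.flatMap_append]

theorem flatMap_fnl_escHd (c : Char) (h : c ≠ '\n') : (escHd c).flatMap fnl = escHd c := by
  by_cases h1 : c = '\\'
  · subst h1; decide
  by_cases h2 : c = '"'
  · subst h2; decide
  by_cases h3 : c = '%'
  · subst h3; decide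
  simp [escHd, fbs, fq, fpc, fnl, h1, h2, h3, h]

theorem escHd_nl : escHd '\n' = ['\n'] := by decide

-- join with head-appended first piece
theorem join_head_append (q p x : List Char) (rest : List (List Char)) :
    PySem.Chars.join q ((p ++ x) :: rest) = p ++ PySem.Chars.join q (x :: rest) := by
  cases rest with
  | nil => simp [PySem.Chars.join_singleton]
  | cons r rs => rw [PySem.Chars.join_cons_cons, PySem.Chars.join_cons_cons]; simp

-- quoting each piece then joining with "," = joining with '","' and wrapping once
theorem quote_join (ps : List (List Char)) (h : ps ≠ []) :
    PySem.Chars.join [','] (ps.map (fun x => ['"'] ++ x ++ ['"']))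
      = ['"'] ++ PySem.Chars.join ['"', ',', '"'] ps ++ ['"'] := by
  induction ps with
  | nil => exact absurd rfl h
  | cons p rest ih =>
      cases rest with
      | nil => simp [PySem.Chars.join_singleton]
      | cons r rs =>
          rw [List.map_cons, List.map_cons, PySem.Chars.join_cons_cons,
            PySem.Chars.join_cons_cons]
          have ih' := ih (by simp)
          simp only [List.map_cons] at ih'
          rw [ih']
          simp

-- the central identity: newline-substitution after escaping the whole string
-- equals escaping each newline-piece and joining with '","'
theorem main_identity (l : List Char) :
    (esc l).flatMap fnl
      = PySem.Chars.join ['"', ',', '"'] ((split1 '\n' l).map esc) := by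
  induction l with
  | nil => simp [esc_nil, split1, PySem.Chars.join_singleton]
  | cons c t ih =>
      rw [esc_cons, List.flatMap_append, ih]
      by_cases hc : c = '\n'
      · subst hc
        rw [escHd_nl]
        have hsplit : split1 '\n' ('\n' :: t) = [] :: split1 '\n' t := by simp [split1]
        rw [hsplit, List.map_cons]
        cases hs : (split1 '\n' t).map esc with
        | nil => exact absurd (List.map_eq_nil_iff.mp hs) (split1_ne_nil '\n' t)
        | cons p rest =>
            rw [esc_nil, PySem.Chars.join_cons_cons]
            simp [fnl]
      · rw [flatMap_fnl_escHd c hc]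
        simp only [split1, if_neg hc]
        cases hs : split1 '\n' t with
        | nil => exact absurd hs (split1_ne_nil '\n' t)
        | cons p rest =>
            simp only [List.modifyHead_cons, List.map_cons, esc_cons]
            rw [join_head_append]

-- A's foldl builds exactly the list of escaped lines
theorem foldl_escape (l : List (List Char)) :
    l.foldl (fun acc line =>
      let e1 := PySem.Chars.replace line ['\\'] ['\\', '\\']
      let e2 := PySem.Chars.replace e1 ['"'] ['\\', '"']
      let e3 := PySem.Chars.replace e2 ['%'] ['%', '%']
      acc ++ [e3]) []
      = l.map esc := by
  rw [PySem.List.foldl_append_singleton_eq_map]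
  refine List.map_congr_left (fun line _ => ?_)
  simp only [replace_single]
  rfl

-- ===== VERDICT (by name: the statement is the Claim_ definition above) =====
theorem encode_query_string_spec : Claim_equal_encode_query_string := by
  intro s _
  unfold Spec_encode_query_string encode_query_string encode_query_string_alt
  apply String.toList_inj.mp
  simp only [String.toList_append, PySem.Str.toList_replace, String.toList_ofList]
  rw [splitOn_single, foldl_escape,
    quote_join _ (by simpa using split1_ne_nil '\n' s.toList)]
  rw [show ("\\".toList) = ['\\'] from rfl, show ("\\\\".toList) = ['\\', '\\'] from rfl,
    show ("\"".toList) = ['"'] from rfl, show ("\\\"".toList) = ['\\', '"'] from rfl,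
    show ("%".toList) = ['%'] from rfl, show ("%%".toList) = ['%', '%'] from rfl,
    show ("\n".toList) = ['\n'] from rfl, show ("\",\"".toList) = ['"', ',', '"'] from rfl]
  rw [replace_single, replace_single, replace_single, replace_single]
  rw [show (fun x => if x = '\\' then ['\\', '\\'] else [x]) = fbs from rfl,
    show (fun x => if x = '"' then ['\\', '"'] else [x]) = fq from rfl,
    show (fun x => if x = '%' then ['%', '%'] else [x]) = fpc from rfl,
    show (fun x => if x = '\n' then ['"', ',', '"'] else [x]) = fnl from rfl]
  rw [show ((s.toList.flatMap fbs).flatMap fq).flatMap fpc = esc s.toList from rfl,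
    main_identity]
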